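-- pv_equiv track=rewrite | github.com/nathandjanica/test | minesweeper_hint.py | analyze_edge_patterns
-- ===== SOURCE A (Python) =====
-- def get_neighbors(row, col, grid):
--     if not grid or not grid[0]:  # Check if grid is empty
--         return []
--     rows, cols = len(grid), len(grid[0])
--     return [
--         (r, c)
--         for dr in [-1, 0, 1]
--         for dc in [-1, 0, 1]
--         if not (dr == 0 and dc == 0)
--         if 0 <= (r := row + dr) < rows and 0 <= (c := col + dc) < cols
--     ]
--
-- def count_neighbors(row, col, grid, value):
--     if not grid or not grid[0]:  # Check if grid is empty
--         return 0
--     return sum(1 for r, c in get_neighbors(row, col, grid) if grid[r][c] == value)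
--
-- def get_unknown_neighbors(row, col, grid):
--     if not grid or not grid[0]:  # Check if grid is empty
--         return []
--     rows, cols = len(grid), len(grid[0])
--     return [(r, c) for r, c in get_neighbors(row, col, grid)
--             if 0 <= r < rows and 0 <= c < cols and grid[r][c] == "?"]
--
-- def analyze_edge_patterns(grid):
--     """Analyze edge and corner patterns for additional moves"""
--     safe, mines = set(), set()
--     rows, cols = len(grid), len(grid[0])
--
--     # Check corners first (they have fewer neighbors)
--     corners = [(0, 0), (0, cols-1), (rows-1, 0), (rows-1, cols-1)]
--     for r, c in corners:
--         if grid[r][c] in "12345678":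
--             n = int(grid[r][c])
--             flagged = count_neighbors(r, c, grid, "F")
--             unknown = count_neighbors(r, c, grid, "?")
--
--             # Corner tiles with 1 neighbor are often solvable
--             if unknown == 1 and n - flagged == 1:
--                 unknown_neighbors = get_unknown_neighbors(r, c, grid)
--                 mines.update(unknown_neighbors)
--             elif unknown == 1 and n == flagged:
--                 unknown_neighbors = get_unknown_neighbors(r, c, grid)
--                 safe.update(unknown_neighbors)
--
--     # Check edges for patterns
--     for r in range(rows):
--         for c in range(cols):
--             if (r == 0 or r == rows-1 or c == 0 or c == cols-1) and grid[r][c] in "12345678":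
--                 n = int(grid[r][c])
--                 flagged = count_neighbors(r, c, grid, "F")
--                 unknown = count_neighbors(r, c, grid, "?")
--                 unknown_neighbors = get_unknown_neighbors(r, c, grid)
--
--                 # Edge tiles with 2 neighbors often have forced moves
--                 if unknown == 2:
--                     if n - flagged == 2:
--                         mines.update(unknown_neighbors)
--                     elif n == flagged:
--                         safe.update(unknown_neighbors)
--
--     return safe, mines
-- ===== SOURCE B (Python) =====
-- def analyze_edge_patterns(grid):
--     """Analyze edge and corner patterns for additional moves"""
--     safe, mines = set(), set()
--     rows, cols = len(grid), len(grid[0])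
--
--     def scan(r, c):
--         # one pass over the (at most 8) neighbours: count flags and collect unknowns
--         flagged, unknown = 0, []
--         for dr in (-1, 0, 1):
--             for dc in (-1, 0, 1):
--                 if dr == 0 and dc == 0:
--                     continue
--                 nr, nc = r + dr, c + dc
--                 if 0 <= nr < rows and 0 <= nc < cols:
--                     v = grid[nr][nc]
--                     if v == "F":
--                         flagged += 1
--                     elif v == "?":
--                         unknown.append((nr, nc))
--         return flagged, unknown
--
--     for r, c in ((0, 0), (0, cols - 1), (rows - 1, 0), (rows - 1, cols - 1)):
--         v = grid[r][c]
--         if v in "12345678":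
--             n = int(v)
--             flagged, unknown = scan(r, c)
--             if len(unknown) == 1:
--                 if n - flagged == 1:
--                     mines.update(unknown)
--                 elif n == flagged:
--                     safe.update(unknown)
--
--     def handle_edge(r, c):
--         v = grid[r][c]
--         if v in "12345678":
--             n = int(v)
--             flagged, unknown = scan(r, c)
--             if len(unknown) == 2:
--                 if n - flagged == 2:
--                     mines.update(unknown)
--                 elif n == flagged:
--                     safe.update(unknown)
--
--     # walk only the perimeter cells, in row-major order
--     for c in range(cols):
--         handle_edge(0, c)
--     for r in range(1, rows - 1):
--         handle_edge(r, 0)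
--         if cols > 1:
--             handle_edge(r, cols - 1)
--     if rows > 1:
--         for c in range(cols):
--             handle_edge(rows - 1, c)
--     return safe, mines
-- ===== Notes on version B (the rewrite author's own statement) =====
-- stated objective: faster
-- what changed: B iterates only the perimeter cells (top row, bottom row, first/last column) instead of scanning every cell of the grid, and gathers each clue's flag count and unknown-neighbour list in a single pass over its neighbours instead of A's three separate neighbour scans (count_neighbors twice plus get_unknown_neighbors, each rebuilding get_neighbors).
import Mathlib
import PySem

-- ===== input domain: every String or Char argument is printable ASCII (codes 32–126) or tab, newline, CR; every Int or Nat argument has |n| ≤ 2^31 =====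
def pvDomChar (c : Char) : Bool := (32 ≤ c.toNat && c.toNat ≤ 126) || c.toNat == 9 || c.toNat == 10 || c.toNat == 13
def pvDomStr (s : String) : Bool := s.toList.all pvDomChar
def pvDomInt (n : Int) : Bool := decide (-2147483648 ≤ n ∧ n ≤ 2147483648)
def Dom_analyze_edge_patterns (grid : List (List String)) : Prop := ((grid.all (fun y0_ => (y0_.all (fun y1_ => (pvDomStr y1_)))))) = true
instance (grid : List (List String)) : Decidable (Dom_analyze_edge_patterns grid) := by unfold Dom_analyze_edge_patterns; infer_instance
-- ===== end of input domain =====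

-- B walks only the perimeter cells (O(rows+cols) cells instead of scanning the whole grid) and
-- gathers each clue's flagged count and unknown-neighbour list in ONE pass over its neighbours.

-- ===== PORT A =====

-- grid[r][c] (indices produced by the loops are always in range under Pre_; total form)
def pvCell (grid : List (List String)) (r c : Int) : String :=
  PySem.List.pyGetD (PySem.List.pyGetD grid r []) c ""

def get_neighbors (row col : Int) (grid : List (List String)) : List (Int × Int) :=
  if grid = [] ∨ grid.headD [] = [] then []
  else
    ([-1, 0, 1] : List Int).flatMap (fun dr =>
      ([-1, 0, 1] : List Int).filterMap (fun dc =>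
        if ¬(dr = 0 ∧ dc = 0) ∧ 0 ≤ row + dr ∧ row + dr < (grid.length : Int)
            ∧ 0 ≤ col + dc ∧ col + dc < ((grid.headD []).length : Int)
        then some (row + dr, col + dc) else none))

def count_neighbors (row col : Int) (grid : List (List String)) (value : String) : Int :=
  if grid = [] ∨ grid.headD [] = [] then 0
  else ((get_neighbors row col grid).countP (fun p => pvCell grid p.1 p.2 == value) : Int)

def get_unknown_neighbors (row col : Int) (grid : List (List String)) : List (Int × Int) :=
  if grid = [] ∨ grid.headD [] = [] then []
  else (get_neighbors row col grid).filter (fun p =>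
    decide (0 ≤ p.1 ∧ p.1 < (grid.length : Int) ∧ 0 ≤ p.2 ∧ p.2 < ((grid.headD []).length : Int))
      && (pvCell grid p.1 p.2 == "?"))

def analyze_edge_patterns (grid : List (List String)) : (List (Int × Int)) × (List (Int × Int)) :=
  let rows : Int := grid.length
  let cols : Int := (PySem.List.pyGetD grid 0 []).length
  let corners : List (Int × Int) := [(0, 0), (0, cols - 1), (rows - 1, 0), (rows - 1, cols - 1)]
  let st1 := corners.foldl (fun st rc =>
      if PySem.Str.isIn (pvCell grid rc.1 rc.2) "12345678" then
        let n := (PySem.Int.ofStr? (pvCell grid rc.1 rc.2)).getD 0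
        let flagged := count_neighbors rc.1 rc.2 grid "F"
        let unknown := count_neighbors rc.1 rc.2 grid "?"
        if unknown = 1 ∧ n - flagged = 1 then
          (st.1, PySem.Set.update st.2 (get_unknown_neighbors rc.1 rc.2 grid))
        else if unknown = 1 ∧ n = flagged then
          (PySem.Set.update st.1 (get_unknown_neighbors rc.1 rc.2 grid), st.2)
        else st
      else st)
    ((PySem.Set.empty, PySem.Set.empty) : PySem.Set (Int × Int) × PySem.Set (Int × Int))
  (PySem.List.pyRange 0 rows 1).foldl (fun st r =>
    (PySem.List.pyRange 0 cols 1).foldl (fun st c =>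
      if (r = 0 ∨ r = rows - 1 ∨ c = 0 ∨ c = cols - 1)
          ∧ PySem.Str.isIn (pvCell grid r c) "12345678" then
        let n := (PySem.Int.ofStr? (pvCell grid r c)).getD 0
        let flagged := count_neighbors r c grid "F"
        let unknown := count_neighbors r c grid "?"
        let unl := get_unknown_neighbors r c grid
        if unknown = 2 then
          if n - flagged = 2 then (st.1, PySem.Set.update st.2 unl)
          else if n = flagged then (PySem.Set.update st.1 unl, st.2)
          else st
        else st
      else st) st) st1

-- ===== PORT B =====

-- one pass over the (at most 8) neighbours: count flags, collect unknowns
def pvScanStep (grid : List (List String)) (acc : Int × List (Int × Int)) (p : Int × Int) :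
    Int × List (Int × Int) :=
  let v := pvCell grid p.1 p.2
  if v = "F" then (acc.1 + 1, acc.2)
  else if v = "?" then (acc.1, acc.2 ++ [p])
  else acc

def pvScan (grid : List (List String)) (rows cols r c : Int) : Int × List (Int × Int) :=
  ([-1, 0, 1] : List Int).foldl (fun acc dr =>
    ([-1, 0, 1] : List Int).foldl (fun acc dc =>
      if dr = 0 ∧ dc = 0 then acc
      else if 0 ≤ r + dr ∧ r + dr < rows ∧ 0 ≤ c + dc ∧ c + dc < cols then
        pvScanStep grid acc (r + dr, c + dc)
      else acc) acc) (0, [])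

def pvCornerStep (grid : List (List String)) (rows cols : Int)
    (st : PySem.Set (Int × Int) × PySem.Set (Int × Int)) (rc : Int × Int) :
    PySem.Set (Int × Int) × PySem.Set (Int × Int) :=
  let v := pvCell grid rc.1 rc.2
  if PySem.Str.isIn v "12345678" then
    let n := (PySem.Int.ofStr? v).getD 0
    let s := pvScan grid rows cols rc.1 rc.2
    if s.2.length = 1 then
      if n - s.1 = 1 then (st.1, PySem.Set.update st.2 s.2)
      else if n = s.1 then (PySem.Set.update st.1 s.2, st.2)
      else st
    else st
  else st

def pvEdgeStep (grid : List (List String)) (rows cols : Int)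
    (st : PySem.Set (Int × Int) × PySem.Set (Int × Int)) (r c : Int) :
    PySem.Set (Int × Int) × PySem.Set (Int × Int) :=
  let v := pvCell grid r c
  if PySem.Str.isIn v "12345678" then
    let n := (PySem.Int.ofStr? v).getD 0
    let s := pvScan grid rows cols r c
    if s.2.length = 2 then
      if n - s.1 = 2 then (st.1, PySem.Set.update st.2 s.2)
      else if n = s.1 then (PySem.Set.update st.1 s.2, st.2)
      else st
    else st
  else st

def analyze_edge_patterns_alt (grid : List (List String)) : (List (Int × Int)) × (List (Int × Int)) :=
  let rows : Int := grid.length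
  let cols : Int := (PySem.List.pyGetD grid 0 []).length
  let st1 := ([(0, 0), (0, cols - 1), (rows - 1, 0), (rows - 1, cols - 1)] : List (Int × Int)).foldl
      (pvCornerStep grid rows cols) (PySem.Set.empty, PySem.Set.empty)
  let st2 := (PySem.List.pyRange 0 cols 1).foldl (fun st c => pvEdgeStep grid rows cols st 0 c) st1
  let st3 := (PySem.List.pyRange 1 (rows - 1) 1).foldl (fun st r =>
      let st' := pvEdgeStep grid rows cols st r 0
      if 1 < cols then pvEdgeStep grid rows cols st' r (cols - 1) else st') st2
  if 1 < rows then
    (PySem.List.pyRange 0 cols 1).foldl (fun st c => pvEdgeStep grid rows cols st (rows - 1) c) st3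
  else st3

-- ===== PRECONDITION & SPEC =====
-- Pre_ excludes exactly the inputs where the Python A raises: an empty grid or empty first row
-- (IndexError), a row shorter than the first row (IndexError while reading a perimeter cell),
-- and an empty-string cell on the perimeter ('' in "12345678" is True, so int('') raises ValueError).
def Pre_analyze_edge_patterns (grid : List (List String)) : Prop :=
  grid ≠ [] ∧ grid.headD [] ≠ [] ∧
  (∀ row ∈ grid, (grid.headD []).length ≤ row.length ∧ row.headD "" ≠ ""
      ∧ (row.take (grid.headD []).length).getLastD "" ≠ "") ∧
  (∀ s ∈ grid.headD [], s ≠ "") ∧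
  (∀ s ∈ (grid.getLastD []).take (grid.headD []).length, s ≠ "")
instance (grid : List (List String)) : Decidable (Pre_analyze_edge_patterns grid) := by
  unfold Pre_analyze_edge_patterns; infer_instance

def pvWitness_analyze_edge_patterns : List (List String) := [["1", "?"], ["F", "2"]]

def Spec_analyze_edge_patterns (grid : List (List String)) (out : (List (Int × Int)) × (List (Int × Int))) : Prop := out = analyze_edge_patterns_alt grid
instance (grid : List (List String)) (out : (List (Int × Int)) × (List (Int × Int))) : Decidable (Spec_analyze_edge_patterns grid out) := by unfold Spec_analyze_edge_patterns; infer_instance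

-- ===== CLAIM (what is proved, stated in full; the proofs are below) =====
def Claim_equal_analyze_edge_patterns : Prop := ∀ (grid : List (List String)), Dom_analyze_edge_patterns grid → Pre_analyze_edge_patterns grid → Spec_analyze_edge_patterns grid (analyze_edge_patterns grid)

-- ===== LEMMAS AND PROOFS =====

lemma pv_getD_zero (grid : List (List String)) :
    PySem.List.pyGetD grid 0 [] = grid.headD [] := by
  cases grid <;> simp [PySem.List.pyGetD, PySem.List.pyGet?, PySem.List.pyIdx?]

-- folding the scan step over any cell list counts the "F"s and collects the "?"s
lemma pv_scan_fold (grid : List (List String)) (L : List (Int × Int)) (a : Int)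
    (u : List (Int × Int)) :
    L.foldl (pvScanStep grid) (a, u) =
      (a + ((L.countP (fun p => pvCell grid p.1 p.2 == "F")) : Int),
       u ++ L.filter (fun p => pvCell grid p.1 p.2 == "?")) := by
  induction L generalizing a u with
  | nil => simp
  | cons p t ih =>
    simp only [List.foldl_cons, List.countP_cons, List.filter_cons, pvScanStep]
    by_cases hF : pvCell grid p.1 p.2 = "F"
    · simp [ih, hF]
      ring
    · by_cases hQ : pvCell grid p.1 p.2 = "?" <;> simp [ih, hF, hQ]

-- pvScan's guarded double loop is exactly the scan-step fold over get_neighbors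
lemma pv_scan_eq_fold (grid : List (List String)) (r c : Int)
    (h1 : grid ≠ []) (h2 : grid.headD [] ≠ []) :
    pvScan grid (grid.length : Int) ((grid.headD []).length : Int) r c
      = (get_neighbors r c grid).foldl (pvScanStep grid) (0, []) := by
  unfold pvScan get_neighbors
  rw [if_neg (not_or.mpr ⟨h1, h2⟩)]
  rw [List.foldl_flatMap]
  refine PySem.List.foldl_congr_mem _ _ _ _ ?_
  intro acc dr _
  rw [List.foldl_filterMap]
  refine PySem.List.foldl_congr_mem _ _ _ _ ?_
  intro acc' dc _
  by_cases h0 : dr = 0 ∧ dc = 0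
  · simp [h0]
  · by_cases hr : 0 ≤ r + dr ∧ r + dr < (grid.length : Int)
        ∧ 0 ≤ c + dc ∧ c + dc < ((grid.headD []).length : Int)
    · rw [if_neg (by tauto), if_pos (by tauto), if_pos (by tauto)]
    · rw [if_neg (by tauto), if_neg (by tauto), if_neg (by tauto)]

lemma pv_mem_get_neighbors (grid : List (List String)) (r c : Int) (p : Int × Int)
    (hp : p ∈ get_neighbors r c grid) :
    0 ≤ p.1 ∧ p.1 < (grid.length : Int) ∧ 0 ≤ p.2 ∧ p.2 < ((grid.headD []).length : Int) := by
  unfold get_neighbors at hp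
  split at hp
  · simp at hp
  · simp only [List.mem_flatMap, List.mem_filterMap] at hp
    obtain ⟨dr, hdr, dc, hdc, hsome⟩ := hp
    split at hsome
    · rename_i hcond
      injection hsome with h
      cases h
      exact ⟨hcond.2.1, hcond.2.2.1, hcond.2.2.2.1, hcond.2.2.2.2⟩
    · cases hsome

-- the redundant bounds test in get_unknown_neighbors never fires
lemma pv_unknown_eq_filter (grid : List (List String)) (r c : Int)
    (h1 : grid ≠ []) (h2 : grid.headD [] ≠ []) :
    get_unknown_neighbors r c grid
      = (get_neighbors r c grid).filter (fun p => pvCell grid p.1 p.2 == "?") := by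
  unfold get_unknown_neighbors
  rw [if_neg (not_or.mpr ⟨h1, h2⟩)]
  refine List.filter_congr ?_
  intro p hp
  have h := pv_mem_get_neighbors grid r c p hp
  simp only [List.headD_eq_head?] at h
  simp [h.1, h.2.1, h.2.2.1, h.2.2.2]

-- pvScan computes (count_neighbors "F", get_unknown_neighbors)
lemma pv_scan_val (grid : List (List String)) (r c : Int)
    (h1 : grid ≠ []) (h2 : grid.headD [] ≠ []) :
    pvScan grid (grid.length : Int) ((grid.headD []).length : Int) r c
      = (count_neighbors r c grid "F", get_unknown_neighbors r c grid) := by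
  rw [pv_scan_eq_fold grid r c h1 h2, pv_scan_fold, pv_unknown_eq_filter grid r c h1 h2]
  unfold count_neighbors
  rw [if_neg (not_or.mpr ⟨h1, h2⟩)]
  simp

-- the "?"-count equals the length of the unknown-neighbour list
lemma pv_count_unknown (grid : List (List String)) (r c : Int)
    (h1 : grid ≠ []) (h2 : grid.headD [] ≠ []) :
    count_neighbors r c grid "?" = ((get_unknown_neighbors r c grid).length : Int) := by
  unfold count_neighbors
  rw [if_neg (not_or.mpr ⟨h1, h2⟩), pv_unknown_eq_filter grid r c h1 h2]
  simp [List.countP_eq_length_filter]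

-- A's corner-loop body equals B's corner step
lemma pv_corner_step_eq (grid : List (List String)) (h1 : grid ≠ []) (h2 : grid.headD [] ≠ [])
    (st : PySem.Set (Int × Int) × PySem.Set (Int × Int)) (rc : Int × Int) :
    (if PySem.Str.isIn (pvCell grid rc.1 rc.2) "12345678" then
        let n := (PySem.Int.ofStr? (pvCell grid rc.1 rc.2)).getD 0
        let flagged := count_neighbors rc.1 rc.2 grid "F"
        let unknown := count_neighbors rc.1 rc.2 grid "?"
        if unknown = 1 ∧ n - flagged = 1 then
          (st.1, PySem.Set.update st.2 (get_unknown_neighbors rc.1 rc.2 grid))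
        else if unknown = 1 ∧ n = flagged then
          (PySem.Set.update st.1 (get_unknown_neighbors rc.1 rc.2 grid), st.2)
        else st
      else st)
    = pvCornerStep grid (grid.length : Int) ((grid.headD []).length : Int) st rc := by
  unfold pvCornerStep
  by_cases hclue : PySem.Str.isIn (pvCell grid rc.1 rc.2) "12345678" = true
  · simp only [hclue, if_pos, pv_scan_val grid rc.1 rc.2 h1 h2,
      pv_count_unknown grid rc.1 rc.2 h1 h2]
    split_ifs <;> first | rfl | omega
  · simp only [hclue]
    rfl

-- A's edge-loop cell body (perimeter test included) equals B's edge step on perimeter cells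
lemma pv_edge_guard_eq (grid : List (List String)) (h1 : grid ≠ []) (h2 : grid.headD [] ≠ [])
    (r c : Int) (hg : r = 0 ∨ r = (grid.length : Int) - 1 ∨ c = 0 ∨ c = ((grid.headD []).length : Int) - 1)
    (st : PySem.Set (Int × Int) × PySem.Set (Int × Int)) :
    (if (r = 0 ∨ r = (grid.length : Int) - 1 ∨ c = 0 ∨ c = ((grid.headD []).length : Int) - 1)
          ∧ PySem.Str.isIn (pvCell grid r c) "12345678" then
        let n := (PySem.Int.ofStr? (pvCell grid r c)).getD 0
        let flagged := count_neighbors r c grid "F"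
        let unknown := count_neighbors r c grid "?"
        let unl := get_unknown_neighbors r c grid
        if unknown = 2 then
          if n - flagged = 2 then (st.1, PySem.Set.update st.2 unl)
          else if n = flagged then (PySem.Set.update st.1 unl, st.2)
          else st
        else st
      else st)
    = pvEdgeStep grid (grid.length : Int) ((grid.headD []).length : Int) st r c := by
  unfold pvEdgeStep
  by_cases hclue : PySem.Str.isIn (pvCell grid r c) "12345678" = true
  · rw [if_pos ⟨hg, hclue⟩]
    simp only [hclue, if_pos, pv_scan_val grid r c h1 h2, pv_count_unknown grid r c h1 h2]
    split_ifs <;> first | rfl | omega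
  · rw [if_neg (fun hh => hclue hh.2)]
    simp only [hclue]
    rfl

-- the perimeter columns of one interior row
lemma pv_perim_filter (C : Int) (hC : 1 ≤ C) :
    (PySem.List.pyRange 0 C 1).filter (fun c => decide (c = 0 ∨ c = C - 1))
      = if 1 < C then [0, C - 1] else [0] := by
  rw [PySem.List.pyRange_one_cons (by omega)]
  simp only [show (0:Int) + 1 = 1 from rfl]
  by_cases hC2 : 1 < C
  · have hmid : PySem.List.pyRange 1 C 1 = PySem.List.pyRange 1 (C - 1) 1 ++ PySem.List.pyRange (C - 1) C 1 :=
      PySem.List.pyRange_one_append 1 (C - 1) C (by omega) (by omega)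
    have hsing : PySem.List.pyRange (C - 1) C 1 = [C - 1] := by
      have := PySem.List.pyRange_one_singleton (C - 1)
      rwa [show C - 1 + 1 = C by omega] at this
    have hnil : (PySem.List.pyRange 1 (C - 1) 1).filter (fun c => decide (c = 0 ∨ c = C - 1)) = [] := by
      refine List.filter_eq_nil_iff.mpr ?_
      intro c hc
      have := PySem.List.mem_pyRange_one.mp hc
      simp only [decide_eq_true_eq]
      omega
    rw [hmid, hsing]
    simp only [List.filter_cons, List.filter_append, hnil]
    simp [hC2]
  · have hC1 : C = 1 := by omega
    subst hC1
    simp [PySem.List.pyRange_one_eq_nil]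

-- a boundary row of A's edge scan folds B's edge step over every column
lemma pv_row_full (grid : List (List String)) (h1 : grid ≠ []) (h2 : grid.headD [] ≠ [])
    (r : Int) (hr : r = 0 ∨ r = (grid.length : Int) - 1)
    (st : PySem.Set (Int × Int) × PySem.Set (Int × Int)) :
    (PySem.List.pyRange 0 ((grid.headD []).length : Int) 1).foldl (fun st c =>
      if (r = 0 ∨ r = (grid.length : Int) - 1 ∨ c = 0 ∨ c = ((grid.headD []).length : Int) - 1)
          ∧ PySem.Str.isIn (pvCell grid r c) "12345678" then
        let n := (PySem.Int.ofStr? (pvCell grid r c)).getD 0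
        let flagged := count_neighbors r c grid "F"
        let unknown := count_neighbors r c grid "?"
        let unl := get_unknown_neighbors r c grid
        if unknown = 2 then
          if n - flagged = 2 then (st.1, PySem.Set.update st.2 unl)
          else if n = flagged then (PySem.Set.update st.1 unl, st.2)
          else st
        else st
      else st) st
    = (PySem.List.pyRange 0 ((grid.headD []).length : Int) 1).foldl
        (fun st c => pvEdgeStep grid (grid.length : Int) ((grid.headD []).length : Int) st r c) st := by
  refine PySem.List.foldl_congr_mem _ _ _ _ ?_
  intro acc c _
  exact pv_edge_guard_eq grid h1 h2 r c (by tauto) acc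

-- an interior row of A's edge scan touches only its two perimeter cells
lemma pv_row_mid (grid : List (List String)) (h1 : grid ≠ []) (h2 : grid.headD [] ≠ [])
    (r : Int) (hr : 1 ≤ r ∧ r < (grid.length : Int) - 1) (hC : 1 ≤ ((grid.headD []).length : Int))
    (st : PySem.Set (Int × Int) × PySem.Set (Int × Int)) :
    (PySem.List.pyRange 0 ((grid.headD []).length : Int) 1).foldl (fun st c =>
      if (r = 0 ∨ r = (grid.length : Int) - 1 ∨ c = 0 ∨ c = ((grid.headD []).length : Int) - 1)
          ∧ PySem.Str.isIn (pvCell grid r c) "12345678" then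
        let n := (PySem.Int.ofStr? (pvCell grid r c)).getD 0
        let flagged := count_neighbors r c grid "F"
        let unknown := count_neighbors r c grid "?"
        let unl := get_unknown_neighbors r c grid
        if unknown = 2 then
          if n - flagged = 2 then (st.1, PySem.Set.update st.2 unl)
          else if n = flagged then (PySem.Set.update st.1 unl, st.2)
          else st
        else st
      else st) st
    = (let st' := pvEdgeStep grid (grid.length : Int) ((grid.headD []).length : Int) st r 0
       if 1 < ((grid.headD []).length : Int) then
         pvEdgeStep grid (grid.length : Int) ((grid.headD []).length : Int) st' r
           (((grid.headD []).length : Int) - 1)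
       else st') := by
  have hstep : ∀ (acc : PySem.Set (Int × Int) × PySem.Set (Int × Int)),
      ∀ c ∈ PySem.List.pyRange 0 ((grid.headD []).length : Int) 1,
      (if (r = 0 ∨ r = (grid.length : Int) - 1 ∨ c = 0 ∨ c = ((grid.headD []).length : Int) - 1)
          ∧ PySem.Str.isIn (pvCell grid r c) "12345678" then
        let n := (PySem.Int.ofStr? (pvCell grid r c)).getD 0
        let flagged := count_neighbors r c grid "F"
        let unknown := count_neighbors r c grid "?"
        let unl := get_unknown_neighbors r c grid
        if unknown = 2 then
          if n - flagged = 2 then (acc.1, PySem.Set.update acc.2 unl)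
          else if n = flagged then (PySem.Set.update acc.1 unl, acc.2)
          else acc
        else acc
      else acc)
      = (if c = 0 ∨ c = ((grid.headD []).length : Int) - 1 then
          pvEdgeStep grid (grid.length : Int) ((grid.headD []).length : Int) acc r c else acc) := by
    intro acc c _
    by_cases hc : c = 0 ∨ c = ((grid.headD []).length : Int) - 1
    · rw [if_pos hc]
      exact pv_edge_guard_eq grid h1 h2 r c (by tauto) acc
    · rw [if_neg hc, if_neg (by intro hh; rcases hh.1 with h | h | h | h <;> omega)]

  rw [PySem.List.foldl_congr_mem _ _ _ _ hstep]
  rw [PySem.List.foldl_ite_eq_foldl_filter (p := fun c => c = 0 ∨ c = ((grid.headD []).length : Int) - 1)]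
  rw [pv_perim_filter _ hC]
  by_cases hC2 : 1 < ((grid.headD []).length : Int)
  · simp only [if_pos hC2, List.foldl_cons, List.foldl_nil]
  · simp only [if_neg hC2, List.foldl_cons, List.foldl_nil]

-- ===== VERDICT (by name: the statement is the Claim_ definition above) =====
theorem analyze_edge_patterns_spec : Claim_equal_analyze_edge_patterns := by
  intro grid _ hpre
  obtain ⟨h1, h2, -, -, -⟩ := hpre
  have hR : 1 ≤ (grid.length : Int) := by
    have := List.length_pos_iff.mpr h1
    omega
  have hC : 1 ≤ ((grid.headD []).length : Int) := by
    have := List.length_pos_iff.mpr h2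
    omega
  unfold Spec_analyze_edge_patterns analyze_edge_patterns analyze_edge_patterns_alt
  simp only [pv_getD_zero]
  rw [PySem.List.foldl_congr_mem _ _ _ _ (fun acc rc _ => pv_corner_step_eq grid h1 h2 acc rc)]
  by_cases hR2 : 1 < (grid.length : Int)
  · have e3 : PySem.List.pyRange 0 1 1 = [(0 : Int)] := by
      have := PySem.List.pyRange_one_singleton (0 : Int)
      simpa using this
    have e4 : PySem.List.pyRange ((grid.length : Int) - 1) (grid.length : Int) 1
        = [(grid.length : Int) - 1] := by
      have := PySem.List.pyRange_one_singleton ((grid.length : Int) - 1)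
      rwa [show (grid.length : Int) - 1 + 1 = (grid.length : Int) by omega] at this
    have e1 : PySem.List.pyRange 0 (grid.length : Int) 1
        = [(0 : Int)] ++ (PySem.List.pyRange 1 ((grid.length : Int) - 1) 1
            ++ [(grid.length : Int) - 1]) := by
      rw [← e3, ← e4, ← PySem.List.pyRange_one_append 1 ((grid.length : Int) - 1) (grid.length : Int) (by omega) (by omega),
        ← PySem.List.pyRange_one_append 0 1 (grid.length : Int) (by omega) (by omega)]
    rw [e1, List.foldl_append, List.foldl_append, List.foldl_cons, List.foldl_nil, List.foldl_cons,
      List.foldl_nil]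
    rw [pv_row_full grid h1 h2 0 (Or.inl rfl) _]
    rw [PySem.List.foldl_congr_mem _ _ _ _ (fun acc r hm =>
      pv_row_mid grid h1 h2 r (by
        have := PySem.List.mem_pyRange_one.mp hm
        omega) hC acc)]
    rw [pv_row_full grid h1 h2 ((grid.length : Int) - 1) (Or.inr rfl) _]
    rw [if_pos hR2]
  · have hR1 : (grid.length : Int) = 1 := by omega
    have e0 : PySem.List.pyRange 0 (grid.length : Int) 1 = [(0 : Int)] := by
      rw [hR1]
      have := PySem.List.pyRange_one_singleton (0 : Int)
      simpa using this
    have emid : PySem.List.pyRange 1 ((grid.length : Int) - 1) 1 = [] :=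
      PySem.List.pyRange_one_eq_nil (by omega)
    rw [e0, List.foldl_cons, List.foldl_nil, emid, List.foldl_nil, if_neg hR2]
    exact pv_row_full grid h1 h2 0 (Or.inl rfl) _
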